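-- pv_equiv track=rewrite | github.com/adnathanail/aoc | 2022/day12/utils.py | generate_square_around_point
-- ===== SOURCE A (Python) =====
-- from typing import Generator, TypeVar, Optional
--
-- def generate_square_around_point(
--     point: tuple[int, int], radius: int, max_i: int, max_j: int
-- ) -> Generator[tuple[int, int], None, None]:
--     """
--     Given a point e.g. (2, 5) and a radius e.g. 1
--     Returns a series of points forming a square centred on that point
--       starting in the top left corner, and continuing clockwise around the square
--
--     e.g.
--     ........
--     ....012.
--     ....7.3.
--     ....654.
--     ........
--
--     If the square would leave the grid, those points are emitted from the return result
--
--     e.g. for radius 3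
--     ..4.....
--     ..3.....
--     ..2.....
--     ..1.....
--     ..0.....
--     """
--     min_square_i = point[0] - radius
--     max_square_i = point[0] + radius
--     min_square_j = point[1] - radius
--     max_square_j = point[1] + radius
--
--     if min_square_i >= 0:
--         for j in range(max(min_square_j, 0), min(max_square_j, max_j) + 1):
--             yield min_square_i, j
--
--     if max_square_j <= max_j:
--         for i in range(max(min_square_i + 1, 0), min(max_square_i - 1, max_i) + 1):
--             yield i, max_square_j
--
--     if max_square_i <= max_i:
--         for j in range(min(max_square_j, max_j), max(min_square_j, 0) - 1, -1):
--             yield max_square_i, j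
--
--     if min_square_j >= 0:
--         for i in range(min(max_square_i - 1, max_i), max(min_square_i, -1), -1):
--             yield i, min_square_j
-- ===== SOURCE B (Python) =====
-- def generate_square_around_point(point, radius, max_i, max_j):
--     # Symmetry reduction: only the canonical TOP edge is ever emitted; the other
--     # three edges are obtained by rotating the whole frame (centre and grid box)
--     # a quarter turn clockwise four times and undoing the rotation on output.
--     ci, cj = point
--     r = radius
--     ilo, ihi, jlo, jhi = 0, max_i, 0, max_j       # grid box in the current frame
--     for q in range(4):
--         if ci - r >= ilo:                         # edge lies grid-side of the boundary it faces
--             s = q % 2                             # odd quarters do not own their corners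
--             for j in range(max(cj - r + s, jlo), min(cj + r - s, jhi) + 1):
--                 i, jj = ci - r, j
--                 for _ in range(q):                # undo the frame rotations
--                     i, jj = jj, -i
--                 yield (i, jj)
--         # rotate the frame a quarter turn: (i, j) -> (-j, i)
--         ci, cj = -cj, ci
--         ilo, ihi, jlo, jhi = -jhi, -jlo, ilo, ihi
-- ===== Notes on version B (the rewrite author's own statement) =====
-- stated objective: alternative
-- what changed: B uses symmetry reduction: it only ever emits one canonical top edge, and produces the other three edges by rotating the whole frame (centre and grid box) a quarter turn clockwise four times, undoing the rotation on each output point; A instead writes four bespoke guarded loops with per-edge clamped bounds.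
import Mathlib
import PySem

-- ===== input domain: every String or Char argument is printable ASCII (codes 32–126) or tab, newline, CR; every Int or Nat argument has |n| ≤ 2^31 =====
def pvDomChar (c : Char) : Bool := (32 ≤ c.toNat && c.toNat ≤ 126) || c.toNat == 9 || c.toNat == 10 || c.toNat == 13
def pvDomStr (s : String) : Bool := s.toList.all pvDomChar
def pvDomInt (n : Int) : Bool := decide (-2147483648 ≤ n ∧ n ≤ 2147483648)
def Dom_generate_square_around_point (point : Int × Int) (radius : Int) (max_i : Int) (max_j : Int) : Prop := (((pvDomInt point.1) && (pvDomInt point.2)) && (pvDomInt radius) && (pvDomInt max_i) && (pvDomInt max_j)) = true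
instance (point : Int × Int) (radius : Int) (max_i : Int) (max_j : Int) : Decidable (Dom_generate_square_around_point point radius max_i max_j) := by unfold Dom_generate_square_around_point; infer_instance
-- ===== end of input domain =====

-- B emits only one canonical top edge and obtains the other three edges by rotating the whole
-- frame a quarter turn four times, undoing the rotation on output (objective: alternative
-- decomposition by symmetry reduction, same cost).
-- Both Python generators are ported as the lists of their yielded values.

-- ===== PORT A =====
def generate_square_around_point (point : Int × Int) (radius : Int) (max_i : Int) (max_j : Int) : List (Int × Int) :=
  let min_square_i := point.1 - radius
  let max_square_i := point.1 + radius
  let min_square_j := point.2 - radius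
  let max_square_j := point.2 + radius
  (if min_square_i ≥ 0 then
      (PySem.List.pyRange (max min_square_j 0) (min max_square_j max_j + 1) 1).map
        (fun j => (min_square_i, j))
    else []) ++
  (if max_square_j ≤ max_j then
      (PySem.List.pyRange (max (min_square_i + 1) 0) (min (max_square_i - 1) max_i + 1) 1).map
        (fun i => (i, max_square_j))
    else []) ++
  (if max_square_i ≤ max_i then
      (PySem.List.pyRange (min max_square_j max_j) (max min_square_j 0 - 1) (-1)).map
        (fun j => (max_square_i, j))
    else []) ++
  (if min_square_j ≥ 0 then
      (PySem.List.pyRange (min (max_square_i - 1) max_i) (max min_square_i (-1)) (-1)).map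
        (fun i => (i, min_square_j))
    else [])

-- ===== PORT B =====
-- state of B's loop: (ci, cj, ilo, ihi, jlo, jhi) — centre and grid box in the current frame —
-- together with the points emitted so far
def generate_square_around_point_alt (point : Int × Int) (radius : Int) (max_i : Int) (max_j : Int) : List (Int × Int) :=
  let st0 : (Int × Int × Int × Int × Int × Int) × List (Int × Int) :=
    ((point.1, point.2, 0, max_i, 0, max_j), [])
  let res := (PySem.List.pyRange 0 4 1).foldl
    (fun st q =>
      let ci := st.1.1
      let cj := st.1.2.1
      let ilo := st.1.2.2.1
      let ihi := st.1.2.2.2.1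
      let jlo := st.1.2.2.2.2.1
      let jhi := st.1.2.2.2.2.2
      let out := st.2
      let out :=
        if ci - radius ≥ ilo then
          let s := PySem.Int.mod q 2
          out ++ (PySem.List.pyRange (max (cj - radius + s) jlo) (min (cj + radius - s) jhi + 1) 1).map
            (fun j => (PySem.List.pyRange 0 q 1).foldl (fun p _ => (p.2, -p.1)) (ci - radius, j))
        else out
      ((-cj, ci, -jhi, -jlo, ilo, ihi), out)) st0
  res.2

-- ===== PRECONDITION & SPEC =====
def Spec_generate_square_around_point (point : Int × Int) (radius : Int) (max_i : Int) (max_j : Int) (out : List (Int × Int)) : Prop := out = generate_square_around_point_alt point radius max_i max_j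
instance (point : Int × Int) (radius : Int) (max_i : Int) (max_j : Int) (out : List (Int × Int)) : Decidable (Spec_generate_square_around_point point radius max_i max_j out) := by unfold Spec_generate_square_around_point; infer_instance

-- ===== CLAIM (what is proved, stated in full; the proofs are below) =====
def Claim_equal_generate_square_around_point : Prop := ∀ (point : Int × Int) (radius : Int) (max_i : Int) (max_j : Int), Dom_generate_square_around_point point radius max_i max_j → Spec_generate_square_around_point point radius max_i max_j (generate_square_around_point point radius max_i max_j)

-- ===== LEMMAS AND PROOFS =====

-- mapping a negation turns an ascending range into the reflected countdown
lemma map_neg_pyRange (a b : Int) (f : Int → Int × Int) :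
    (PySem.List.pyRange a b 1).map (fun t => f (-t)) =
      (PySem.List.pyRange (-a) (-b) (-1)).map f := by
  rw [PySem.List.pyRange_one, PySem.List.pyRange_neg_one, List.map_map, List.map_map,
    show -a - -b = b - a from by ring]
  exact List.map_congr_left (fun k _ => by simp only [Function.comp_apply]; congr 1; ring)

-- ===== VERDICT (by name: the statement is the Claim_ definition above) =====
theorem generate_square_around_point_spec : Claim_equal_generate_square_around_point := by
  intro ⟨pi, pj⟩ radius max_i max_j _
  unfold Spec_generate_square_around_point generate_square_around_point generate_square_around_point_alt
  simp only [show PySem.List.pyRange 0 4 1 = [0, 1, 2, 3] from rfl,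
    show PySem.List.pyRange 0 (0 : Int) 1 = [] from rfl,
    show PySem.List.pyRange 0 (1 : Int) 1 = [0] from rfl,
    show PySem.List.pyRange 0 (2 : Int) 1 = [0, 1] from rfl,
    show PySem.List.pyRange 0 (3 : Int) 1 = [0, 1, 2] from rfl,
    show PySem.Int.mod 0 2 = 0 from rfl, show PySem.Int.mod 1 2 = 1 from rfl,
    show PySem.Int.mod 2 2 = 0 from rfl, show PySem.Int.mod 3 2 = 1 from rfl,
    List.foldl_cons, List.foldl_nil, neg_neg, neg_zero]
  -- normalise the rotated guards, bounds and emitted points back to A's frame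
  rw [show -(-pj - radius) = pj + radius from by ring,
    show -(-pi - radius) = pi + radius from by ring,
    show pj - radius + 0 = pj - radius from by ring,
    show pj + radius - 0 = pj + radius from by ring,
    show -pj - radius + 0 = -pj - radius from by ring,
    show -pj + radius - 0 = -pj + radius from by ring,
    map_neg_pyRange (max (-pj - radius) (-max_j)) (min (-pj + radius) 0 + 1)
      (fun x => (pi + radius, x)),
    map_neg_pyRange (max (-pi - radius + 1) (-max_i)) (min (-pi + radius - 1) 0 + 1)
      (fun x => (x, pj - radius)),
    show -(max (-pj - radius) (-max_j)) = min (pj + radius) max_j from by omega,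
    show -(min (-pj + radius) 0 + 1) = max (pj - radius) 0 - 1 from by omega,
    show -(max (-pi - radius + 1) (-max_i)) = min (pi + radius - 1) max_i from by omega,
    show -(min (-pi + radius - 1) 0 + 1) = max (pi - radius) (-1) from by omega]
  -- the guards of the rotated frames are A's guards
  by_cases h2 : pj + radius ≤ max_j
  · rw [if_pos h2, if_pos (show -pj - radius ≥ -max_j from by omega)]
    by_cases h3 : pi + radius ≤ max_i
    · rw [if_pos h3, if_pos (show -pi - radius ≥ -max_i from by omega)]
      split_ifs <;> simp
    · rw [if_neg h3, if_neg (show ¬(-pi - radius ≥ -max_i) from by omega)]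
      split_ifs <;> simp
  · rw [if_neg h2, if_neg (show ¬(-pj - radius ≥ -max_j) from by omega)]
    by_cases h3 : pi + radius ≤ max_i
    · rw [if_pos h3, if_pos (show -pi - radius ≥ -max_i from by omega)]
      split_ifs <;> simp
    · rw [if_neg h3, if_neg (show ¬(-pi - radius ≥ -max_i) from by omega)]
      split_ifs <;> simp
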